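-- pv_equiv track=rewrite | github.com/slavah8/leetcode | 0660-remove-9/0660-remove-9.py | newInteger
-- ===== SOURCE A (Python) =====
-- def newInteger(n: int) -> int:
--
--     res = 0
--     place = 1
--
--     while n > 0:
--         digit = n % 9
--         res += digit * place
--         place *= 10
--         n = n // 9
--
--     return res
-- ===== SOURCE B (Python) =====
-- def newInteger(n: int) -> int:
--     # Two-pass decomposition: collect the base-9 digits (low-order first),
--     # then convert the reversed digit list with a Horner fold.
--     digits = []
--     while n > 0:
--         digits.append(n % 9)
--         n //= 9
--     res = 0
--     for d in reversed(digits):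
--         res = res * 10 + d
--     return res
-- ===== Notes on version B (the rewrite author's own statement) =====
-- stated objective: alternative
-- what changed: A computes the result in one loop with a running place-value accumulator (res, place); B first collects the base-9 digit list and then converts it in a second pass by a Horner fold over the reversed digits, with no place variable.
import Mathlib
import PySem

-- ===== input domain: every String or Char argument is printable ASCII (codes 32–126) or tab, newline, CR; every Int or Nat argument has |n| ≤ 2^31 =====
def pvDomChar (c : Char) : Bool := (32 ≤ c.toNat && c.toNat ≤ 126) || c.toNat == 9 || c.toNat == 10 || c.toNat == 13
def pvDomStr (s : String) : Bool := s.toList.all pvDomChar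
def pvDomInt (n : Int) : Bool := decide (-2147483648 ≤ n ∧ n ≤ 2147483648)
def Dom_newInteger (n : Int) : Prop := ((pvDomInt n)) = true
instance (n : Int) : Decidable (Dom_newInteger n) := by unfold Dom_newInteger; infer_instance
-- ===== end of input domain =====

-- B replaces A's single loop with a running (res, place) accumulator by a two-pass
-- decomposition: build the base-9 digit list, then a Horner fold over its reverse (objective: alternative).

-- ===== PORT A =====
def newIntegerLoop (n res place : Int) : Int :=
  if n > 0 then
    newIntegerLoop (PySem.Int.floordiv n 9) (res + PySem.Int.mod n 9 * place) (place * 10)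
  else res
termination_by n.toNat
decreasing_by
  rename_i h
  rw [PySem.Int.floordiv_eq_ediv_of_pos (by omega)]
  omega

def newInteger (n : Int) : Int := newIntegerLoop n 0 1

-- ===== PORT B =====
def digitsB (n : Int) : List Int :=
  if n > 0 then PySem.Int.mod n 9 :: digitsB (PySem.Int.floordiv n 9) else []
termination_by n.toNat
decreasing_by
  rename_i h
  rw [PySem.Int.floordiv_eq_ediv_of_pos (by omega)]
  omega

def newInteger_alt (n : Int) : Int :=
  (digitsB n).reverse.foldl (fun a d => a * 10 + d) 0

-- ===== PRECONDITION & SPEC =====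
def Spec_newInteger (n : Int) (out : Int) : Prop := out = newInteger_alt n
instance (n : Int) (out : Int) : Decidable (Spec_newInteger n out) := by unfold Spec_newInteger; infer_instance

-- ===== CLAIM (what is proved, stated in full; the proofs are below) =====
def Claim_equal_newInteger : Prop := ∀ (n : Int), Dom_newInteger n → Spec_newInteger n (newInteger n)

-- ===== LEMMAS AND PROOFS =====

-- low-order-first value of a digit list
def valLE : List Int → Int
  | [] => 0
  | d :: ds => d + 10 * valLE ds

theorem foldl_rev_valLE (ds : List Int) (acc : Int) :
    ds.reverse.foldl (fun a d => a * 10 + d) acc = acc * 10 ^ ds.length + valLE ds := by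
  induction ds generalizing acc with
  | nil => simp [valLE]
  | cons d t ih =>
    simp [List.foldl_append, ih, valLE]
    ring

theorem newIntegerLoop_eq (n res place : Int) :
    newIntegerLoop n res place = res + place * valLE (digitsB n) := by
  fun_induction newIntegerLoop n res place with
  | case1 n res place h ih =>
    rw [digitsB, if_pos h, valLE, ih]
    ring
  | case2 n res place h =>
    rw [digitsB, if_neg h, valLE]
    ring

-- ===== VERDICT (by name: the statement is the Claim_ definition above) =====
theorem newInteger_spec : Claim_equal_newInteger := by
  intro n _
  show newInteger n = newInteger_alt n
  rw [newInteger, newInteger_alt, newIntegerLoop_eq, foldl_rev_valLE]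
  ring
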